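-- pv_equiv track=rewrite | github.com/datawhalechina/huawei-od-python | codes/choice100/295_Min-Board-Length.py | solution
-- ===== SOURCE A (Python) =====
-- def solution(N, M, length):
-- 	'''
-- 	N: number of boards
-- 	M: meters of total unused boards
-- 	length: length of each boards
-- 	'''
-- 	length.sort() # sort ascending
-- 	i = 0 # index of current length of board
-- 	for j in range(M): # use every meter
-- 		length[i] += 1
-- 		if i == (N - 1) or length[i + 1] >= length[i]: # greater_euqal after filling
-- 			i = 0 # back to i=0 and refill
-- 		else:
-- 			i += 1 # move forward
-- 	return sorted(length)[0] # re-sort and return minValue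
-- ===== SOURCE B (Python) =====
-- def solution(N, M, length):
--     length.sort()
--     lo, hi = length[0], length[0] + M
--     while lo < hi:
--         mid = (lo + hi + 1) // 2
--         if sum(mid - l for l in length if l < mid) <= M:
--             lo = mid
--         else:
--             hi = mid - 1
--     return lo
-- ===== Notes on version B (the rewrite author's own statement) =====
-- stated objective: alternative
-- what changed: A simulates the distribution one meter at a time with a moving pointer over the sorted list; B instead binary-searches the largest achievable minimum level L such that sum(max(0, L-l)) <= M, so the per-meter loop is replaced by a level-feasibility check.
-- outside the precondition, e.g. on solution(2, 3, [1, 1, 1]): A returns 1, B returns 2; on solution(0, 6, [1, 3]): A raises IndexError, B returns 5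
import Mathlib
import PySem

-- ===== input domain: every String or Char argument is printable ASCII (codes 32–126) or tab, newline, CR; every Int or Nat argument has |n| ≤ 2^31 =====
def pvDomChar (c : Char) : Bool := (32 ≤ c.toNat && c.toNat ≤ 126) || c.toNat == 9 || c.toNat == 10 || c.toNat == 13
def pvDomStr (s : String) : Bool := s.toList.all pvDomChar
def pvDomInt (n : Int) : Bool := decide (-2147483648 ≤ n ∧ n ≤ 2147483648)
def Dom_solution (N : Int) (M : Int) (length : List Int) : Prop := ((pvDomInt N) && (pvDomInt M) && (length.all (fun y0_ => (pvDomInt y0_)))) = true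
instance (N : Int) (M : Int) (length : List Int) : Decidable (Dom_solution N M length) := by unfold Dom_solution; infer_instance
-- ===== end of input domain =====

-- B replaces A's meter-by-meter pointer simulation by a binary search for the largest
-- minimum level L with sum(max(0, L - l)) <= M; both sort `length` in place (the
-- equivalence is about the return value; the observable mutation — sorting — is the same).

-- ===== PORT A =====
-- Literal transliteration of A: sort, then a fold over range(M) carrying (array, pointer i);
-- list indexing/assignment uses the total pyGetD/pySetD forms — Pre_solution restricts to the
-- inputs where Python's length[i], length[i+1] accesses are in range (no IndexError).
def solution (N : Int) (M : Int) (length : List Int) : Int :=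
  let arr0 := PySem.List.sorted length (fun x => x)        -- length.sort()
  let st :=
    (PySem.List.pyRange 0 M 1).foldl (fun (st : List Int × Int) _ =>
      let arr := PySem.List.pySetD st.1 st.2 (PySem.List.pyGetD st.1 st.2 0 + 1)  -- length[i] += 1
      if st.2 = N - 1 ∨ PySem.List.pyGetD arr (st.2 + 1) 0 ≥ PySem.List.pyGetD arr st.2 0 then
        (arr, 0)
      else
        (arr, st.2 + 1)) (arr0, 0)
  PySem.List.pyGetD (PySem.List.sorted st.1 (fun x => x)) 0 0   -- sorted(length)[0]

-- ===== PORT B =====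
-- sum(mid - l for l in length if l < mid)
def pvCost (arr : List Int) (mid : Int) : Int :=
  arr.foldl (fun s l => if l < mid then s + (mid - l) else s) 0

-- the while-loop of Source B: binary search for the largest level lo with pvCost ≤ M;
-- the fuel argument ((hi-lo).toNat + 1 at the call site) only makes the loop
-- structurally recursive — it never runs out (pvBS_spec's induction shows the
-- gap hi-lo shrinks below it).
def pvBS (fuel : Nat) (M : Int) (arr : List Int) (lo hi : Int) : Int :=
  match fuel with
  | 0 => lo
  | fuel + 1 =>
    if lo < hi then
      let mid := PySem.Int.floordiv (lo + hi + 1) 2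
      if pvCost arr mid ≤ M then pvBS fuel M arr mid hi else pvBS fuel M arr lo (mid - 1)
    else lo

def solution_alt (N : Int) (M : Int) (length : List Int) : Int :=
  let arr := PySem.List.sorted length (fun x => x)   -- length.sort()
  let lo := PySem.List.pyGetD arr 0 0                -- length[0]
  pvBS ((lo + M - lo).toNat + 1) M arr lo (lo + M)

-- ===== PRECONDITION & SPEC =====
-- Pre_ restricts to the function's natural domain — a nonempty list with N = len(length)
-- (N is documented as the number of boards) — plus the trivial M ≤ 0 inputs, where the loop
-- body never runs for any N; it excludes N ≠ len(length) with M > 0, where A's pointer logic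
-- raises IndexError on some inputs and returns accidental values on others (see claim cites).
def Pre_solution (N : Int) (M : Int) (length : List Int) : Prop :=
  length ≠ [] ∧ (N = (length.length : Int) ∨ M ≤ 0)
instance (N : Int) (M : Int) (length : List Int) : Decidable (Pre_solution N M length) := by
  unfold Pre_solution; infer_instance

def pvWitness_solution : Int × Int × List Int := (3, 4, [2, 5, 3])

def Spec_solution (N : Int) (M : Int) (length : List Int) (out : Int) : Prop := out = solution_alt N M length
instance (N : Int) (M : Int) (length : List Int) (out : Int) : Decidable (Spec_solution N M length out) := by unfold Spec_solution; infer_instance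

-- ===== CLAIM (what is proved, stated in full; the proofs are below) =====
def Claim_equal_solution : Prop := ∀ (N : Int) (M : Int) (length : List Int), Dom_solution N M length → Pre_solution N M length → Spec_solution N M length (solution N M length)

-- ===== LEMMAS AND PROOFS =====

-- cost as a sum of clamped deficits
theorem pvCost_eq_sum (arr : List Int) (L : Int) :
    pvCost arr L = (arr.map (fun l => max 0 (L - l))).sum := by
  have aux : ∀ (l : List Int) (s : Int),
      l.foldl (fun s l => if l < L then s + (L - l) else s) s
        = s + (l.map (fun l => max 0 (L - l))).sum := by
    intro l
    induction l with
    | nil => intro s; simp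
    | cons a t ih =>
      intro s
      simp only [List.foldl_cons, List.map_cons, List.sum_cons, ih]
      split_ifs with h <;> omega
  simpa [pvCost] using aux arr 0

theorem pvCost_mono (arr : List Int) {L L' : Int} (h : L ≤ L') : pvCost arr L ≤ pvCost arr L' := by
  rw [pvCost_eq_sum, pvCost_eq_sum]
  apply List.sum_le_sum
  intro l _
  omega

theorem pvCost_succ (arr : List Int) (L : Int) :
    pvCost arr (L + 1) = pvCost arr L + (arr.countP (fun l => decide (l < L + 1)) : Int) := by
  rw [pvCost_eq_sum, pvCost_eq_sum]
  induction arr with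
  | nil => simp
  | cons a t ih =>
    simp only [List.map_cons, List.sum_cons, List.countP_cons]
    rw [ih]
    push_cast
    split_ifs with h <;> simp at h <;> omega

theorem pvCost_ge_of_mem {arr : List Int} {x : Int} (hx : x ∈ arr) (L : Int) :
    L - x ≤ pvCost arr L := by
  rw [pvCost_eq_sum]
  have h1 : max 0 (L - x) ≤ ((arr.map (fun l => max 0 (L - l))).sum) := by
    apply List.single_le_sum
    · intro y hy
      simp only [List.mem_map] at hy
      obtain ⟨l, _, rfl⟩ := hy
      exact le_max_left _ _
    · exact List.mem_map.2 ⟨x, hx, rfl⟩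
  omega

theorem pvCost_eq_zero {arr : List Int} {L : Int} (h : ∀ x ∈ arr, L ≤ x) : pvCost arr L = 0 := by
  rw [pvCost_eq_sum]
  apply List.sum_eq_zero
  intro x hx
  simp only [List.mem_map] at hx
  obtain ⟨l, hl, rfl⟩ := hx
  have := h l hl
  omega

-- binary-search correctness: pvBS returns the unique bracketed level
theorem pvBS_spec (fuel : Nat) (M : Int) (arr : List Int) (lo hi : Int)
    (hfuel : (hi - lo).toNat < fuel)
    (hle : lo ≤ hi) (hlo : pvCost arr lo ≤ M) (hhi : M < pvCost arr (hi + 1)) :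
    pvCost arr (pvBS fuel M arr lo hi) ≤ M ∧ M < pvCost arr (pvBS fuel M arr lo hi + 1) := by
  induction fuel generalizing lo hi with
  | zero => omega
  | succ fuel ih =>
    rw [pvBS]
    by_cases h : lo < hi
    · rw [if_pos h]
      have h2 := PySem.Int.floordiv_eq_ediv_of_pos (a := lo + hi + 1) (b := 2) (by omega)
      dsimp only
      by_cases hc : pvCost arr (PySem.Int.floordiv (lo + hi + 1) 2) ≤ M
      · rw [if_pos hc]
        exact ih _ _ (by rw [h2] at *; omega) (by rw [h2] at *; omega) hc hhi
      · rw [if_neg hc]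
        refine ih _ _ (by rw [h2] at *; omega) (by rw [h2] at *; omega) hlo ?_
        have : PySem.Int.floordiv (lo + hi + 1) 2 - 1 + 1 = PySem.Int.floordiv (lo + hi + 1) 2 := by ring
        rw [this]
        omega
    · rw [if_neg h]
      have : lo = hi := by omega
      exact ⟨hlo, by rw [this]; exact hhi⟩

theorem pvLevel_unique (arr : List Int) (M : Int) {L L' : Int}
    (h1 : pvCost arr L ≤ M) (h2 : M < pvCost arr (L + 1))
    (h1' : pvCost arr L' ≤ M) (h2' : M < pvCost arr (L' + 1)) : L = L' := by
  by_contra hne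
  rcases lt_trichotomy L L' with hlt | he | hgt
  · have : pvCost arr (L + 1) ≤ pvCost arr L' := pvCost_mono arr (by omega)
    omega
  · exact hne he
  · have : pvCost arr (L' + 1) ≤ pvCost arr L := pvCost_mono arr (by omega)
    omega

-- A's array state after j meters: sorted base b, water level L, r boards already bumped to L+1
def pvArr (b : List Int) (L : Int) (r : Nat) : List Int :=
  b.mapIdx (fun k x => max x L + (if k < r then 1 else 0))

-- sorted order ↔ countP: in a ≤-sorted list, b[k] < L exactly for the first countP positions
theorem pvSorted_lt_iff {b : List Int} (hp : b.Pairwise (· ≤ ·)) {k : Nat} (hk : k < b.length) (L : Int) :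
    b[k] < L ↔ k < b.countP (fun l => decide (l < L)) := by
  induction b generalizing k with
  | nil => simp at hk
  | cons a t ih =>
    rw [List.pairwise_cons] at hp
    have hzero : ¬ a < L → t.countP (fun l => decide (l < L)) = 0 := by
      intro h2
      rw [List.countP_eq_zero]
      intro x hx
      have := hp.1 x hx
      simp only [decide_eq_true_eq]
      omega
    rcases k with _ | k
    · simp only [List.getElem_cons_zero, List.countP_cons]
      by_cases h2 : a < L
      · simp [h2] <;> omega
      · simp [h2, hzero h2] <;> omega
    · simp only [List.getElem_cons_succ, List.countP_cons]
      have hk' : k < t.length := by simpa using hk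
      rw [ih hp.2 hk']
      by_cases h2 : a < L
      · simp [h2] <;> omega
      · simp [h2, hzero h2] <;> omega

theorem pvArr_length (b : List Int) (L : Int) (r : Nat) : (pvArr b L r).length = b.length := by
  simp [pvArr]

theorem pvArr_getElem (b : List Int) (L : Int) (r : Nat) {k : Nat} (hk : k < b.length) :
    (pvArr b L r)[k]'(by simpa [pvArr_length] using hk)
      = max b[k] L + (if k < r then 1 else 0) := by
  simp [pvArr]

theorem pvHead_le {b : List Int} (hp : b.Pairwise (· ≤ ·)) {k : Nat} (hk : k < b.length) :
    b[0]'(by omega) ≤ b[k] := by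
  rcases Nat.eq_zero_or_pos k with h0 | h0
  · subst h0; exact le_refl _
  · exact (List.pairwise_iff_getElem.mp hp) 0 k (by omega) hk h0

-- the main loop invariant
theorem pvInv (b : List Int) (hp : b.Pairwise (· ≤ ·)) (hne : b ≠ []) (j : Nat) :
    ∃ (L : Int) (r : Nat), pvCost b L ≤ (j : Int) ∧ ((j : Int)) < pvCost b (L + 1) ∧
      (r : Int) = (j : Int) - pvCost b L ∧
      (PySem.List.pyRange 0 (j : Int) 1).foldl (fun (st : List Int × Int) _ =>
        let arr := PySem.List.pySetD st.1 st.2 (PySem.List.pyGetD st.1 st.2 0 + 1)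
        if st.2 = (b.length : Int) - 1 ∨ PySem.List.pyGetD arr (st.2 + 1) 0 ≥ PySem.List.pyGetD arr st.2 0 then
          (arr, 0)
        else
          (arr, st.2 + 1)) (b, 0) = (pvArr b L r, (r : Int)) := by
  induction j with
  | zero =>
    have hn : 0 < b.length := List.length_pos_iff.mpr hne
    have hle : ∀ x ∈ b, b[0] ≤ x := by
      intro x hx
      obtain ⟨k, hk, rfl⟩ := List.mem_iff_getElem.mp hx
      exact pvHead_le hp hk
    have hc0 : pvCost b b[0] = 0 := pvCost_eq_zero hle
    refine ⟨b[0], 0, by simp [hc0], ?_, by simp [hc0], ?_⟩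
    · rw [pvCost_succ, hc0]
      have h0 : (0 : Nat) < b.countP (fun l => decide (l < b[0] + 1)) :=
        (pvSorted_lt_iff hp hn _).mp (by omega)
      push_cast
      omega
    · rw [PySem.List.pyRange_one_eq_nil (by simp), List.foldl_nil]
      refine Prod.ext ?_ (by simp)
      apply List.ext_getElem (by simp [pvArr_length])
      intro k hk1 hk2
      rw [pvArr_getElem b b[0] 0 hk1]
      have := pvHead_le hp (k := k) hk1
      simp
      omega
  | succ j ih =>
    obtain ⟨L, r, h1, h2, h3, h4⟩ := ih
    have hn : 0 < b.length := List.length_pos_iff.mpr hne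
    set m := b.countP (fun l => decide (l < L + 1)) with hm
    have hcs : pvCost b (L + 1) = pvCost b L + (m : Int) := pvCost_succ b L
    have hrm : r < m := by omega
    have hmn : m ≤ b.length := List.countP_le_length
    have hrn : r < b.length := by omega
    have hiff : ∀ (k : Nat) (hk : k < b.length), b[k] < L + 1 ↔ k < m :=
      fun k hk => pvSorted_lt_iff hp hk (L + 1)
    have hbr : b[r] ≤ L := by have := (hiff r hrn).mpr hrm; omega
    have hsplit : PySem.List.pyRange 0 ((j + 1 : Nat) : Int) 1
        = PySem.List.pyRange 0 (j : Int) 1 ++ [(j : Int)] := by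
      push_cast
      exact PySem.List.pyRange_one_succ_right (by positivity)
    rw [hsplit, List.foldl_append, h4, List.foldl_cons, List.foldl_nil]
    have hget : PySem.List.pyGetD (pvArr b L r) (r : Int) 0 = L := by
      rw [PySem.List.pyGetD_natCast, List.getD_eq_getElem _ _ (by rwa [pvArr_length]),
        pvArr_getElem b L r hrn]
      simp
      omega
    have hset : PySem.List.pySetD (pvArr b L r) (r : Int) (L + 1) = pvArr b L (r + 1) := by
      rw [PySem.List.pySetD_natCast]
      apply List.ext_getElem (by simp [pvArr_length])
      intro k hk1 hk2
      rw [List.getElem_set, pvArr_getElem b L (r + 1) (by simpa [pvArr_length] using hk2)]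
      rcases eq_or_ne r k with rfl | hne2
      · simp
        omega
      · rw [if_neg hne2, pvArr_getElem b L r (by simpa [pvArr_length] using hk2)]
        have : k < r ↔ k < r + 1 := by omega
        simp [this]
    have hr2get : PySem.List.pyGetD (pvArr b L (r + 1)) (r : Int) 0 = L + 1 := by
      rw [PySem.List.pyGetD_natCast, List.getD_eq_getElem _ _ (by rwa [pvArr_length]),
        pvArr_getElem b L (r + 1) hrn]
      simp
      omega
    dsimp only
    rw [hget, hset, hr2get]
    by_cases hcase : r + 1 < m
    · have hnext : PySem.List.pyGetD (pvArr b L (r + 1)) ((r : Int) + 1) 0 = L := by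
        have hc : ((r : Int) + 1) = ((r + 1 : Nat) : Int) := by push_cast; ring
        have hr1n : r + 1 < b.length := by omega
        rw [hc, PySem.List.pyGetD_natCast, List.getD_eq_getElem _ _ (by rwa [pvArr_length]),
          pvArr_getElem b L (r + 1) hr1n]
        have : b[r + 1] ≤ L := by have := (hiff (r + 1) hr1n).mpr hcase; omega
        simp
        omega
      rw [hnext, if_neg (by push_cast; omega)]
      refine ⟨L, r + 1, by push_cast; omega, by push_cast at *; omega, by push_cast at *; omega, ?_⟩
      refine Prod.ext rfl (by push_cast; ring)
    · have hrm1 : r + 1 = m := by omega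
      have harr3 : pvArr b L (r + 1) = pvArr b (L + 1) 0 := by
        apply List.ext_getElem (by simp [pvArr_length])
        intro k hk1 hk2
        have hkb : k < b.length := by simpa [pvArr_length] using hk2
        rw [pvArr_getElem b L (r + 1) hkb, pvArr_getElem b (L + 1) 0 hkb]
        rcases Nat.lt_or_ge k m with hk3 | hk3
        · have : b[k] < L + 1 := (hiff k hkb).mpr hk3
          have hkr : k < r + 1 := by omega
          simp [hkr]
          omega
        · have : ¬ b[k] < L + 1 := fun h => by have := (hiff k hkb).mp h; omega
          have hkr : ¬ k < r + 1 := by omega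
          simp [hkr]
          omega
      have hcond : (r : Int) = (b.length : Int) - 1 ∨
          PySem.List.pyGetD (pvArr b L (r + 1)) ((r : Int) + 1) 0 ≥ L + 1 := by
        rcases Nat.lt_or_ge (r + 1) b.length with hr1n | hr1n
        · right
          have hc : ((r : Int) + 1) = ((r + 1 : Nat) : Int) := by push_cast; ring
          rw [hc, PySem.List.pyGetD_natCast, List.getD_eq_getElem _ _ (by rwa [pvArr_length]),
            pvArr_getElem b L (r + 1) hr1n]
          have : ¬ b[r + 1] < L + 1 := fun h => by have := (hiff (r + 1) hr1n).mp h; omega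
          simp
          omega
        · left
          push_cast
          omega
      rw [if_pos hcond]
      have hnew1 : pvCost b (L + 1) = ((j : Int) + 1) := by push_cast at *; omega
      refine ⟨L + 1, 0, by omega, ?_, by push_cast; omega, ?_⟩
      · rw [pvCost_succ b (L + 1)]
        have hb0 : b[0] < L + 1 + 1 := by
          have := pvHead_le hp hrn
          omega
        have h0 : (0 : Nat) < b.countP (fun l => decide (l < L + 1 + 1)) :=
          (pvSorted_lt_iff hp hn _).mp hb0
        push_cast
        omega
      · rw [harr3]
        simp

-- ===== VERDICT (by name: the statement is the Claim_ definition above) =====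
theorem solution_spec : Claim_equal_solution := by
  unfold Claim_equal_solution
  intro N M length hdom hpre
  unfold Spec_solution
  obtain ⟨hne, hN⟩ := hpre
  simp only [solution, solution_alt]
  set b := PySem.List.sorted length (fun x => x) with hb
  have hp : b.Pairwise (· ≤ ·) := by
    simpa using PySem.List.sorted_pairwise (xs := length) (key := fun x => x)
  have hbne : b ≠ [] := by
    rw [hb, Ne, PySem.List.sorted_eq_nil_iff]
    exact hne
  have hlen : b.length = length.length := by rw [hb, PySem.List.length_sorted]
  have hn : 0 < b.length := List.length_pos_iff.mpr hbne
  have hb0 : PySem.List.pyGetD b 0 0 = b[0] := by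
    rw [PySem.List.pyGetD_zero, List.getD_eq_getElem _ _ hn]
  have hle : ∀ x ∈ b, b[0] ≤ x := by
    intro x hx
    obtain ⟨k, hk, rfl⟩ := List.mem_iff_getElem.mp hx
    exact pvHead_le hp hk
  have hc0 : pvCost b b[0] = 0 := pvCost_eq_zero hle
  rcases (by omega : M ≤ 0 ∨ 0 < M) with hM | hM
  · rw [PySem.List.pyRange_one_eq_nil (by omega), List.foldl_nil]
    rw [show ((PySem.List.pyGetD b 0 0 + M) - PySem.List.pyGetD b 0 0).toNat = 0 by omega]
    rw [pvBS, if_neg (by omega)]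
    rw [hb, PySem.List.sorted_sorted]
  · have hNl : N = (length.length : Int) := hN.resolve_right (by omega)
    subst hNl
    rw [show ((length.length : Int)) = (b.length : Int) by rw [hlen]]
    have hM' : 0 ≤ M := by omega
    have hMt : ((M.toNat : Nat) : Int) = M := Int.toNat_of_nonneg hM'
    obtain ⟨L, r, h1, h2, h3, h4⟩ := pvInv b hp hbne M.toNat
    rw [hMt] at h1 h2 h3 h4
    rw [h4]
    -- facts about (L, r)
    have hcs := pvCost_succ b L
    set m := b.countP (fun l => decide (l < L + 1)) with hm
    have hrm : r < m := by omega
    have hmn : m ≤ b.length := List.countP_le_length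
    have hrn : r < b.length := by omega
    have hbr : b[r] ≤ L := by
      have := (pvSorted_lt_iff hp hrn (L + 1)).mpr hrm
      omega
    -- the minimum of the final array is L
    have hLmem : L ∈ pvArr b L r := by
      rw [List.mem_iff_getElem]
      refine ⟨r, by rwa [pvArr_length], ?_⟩
      rw [pvArr_getElem b L r hrn]
      simp
      omega
    have hAval : PySem.List.pyGetD (PySem.List.sorted (pvArr b L r) (fun x => x)) 0 0 = L := by
      cases hs : PySem.List.sorted (pvArr b L r) (fun x => x) with
      | nil =>
        rw [PySem.List.sorted_eq_nil_iff] at hs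
        have : (pvArr b L r).length = 0 := by rw [hs]; rfl
        rw [pvArr_length] at this
        omega
      | cons h t =>
        rw [PySem.List.pyGetD_zero_cons]
        have hmem : h ∈ pvArr b L r := by
          rw [← PySem.List.mem_sorted (key := fun x => x) (rev := false), hs]
          exact List.mem_cons_self
        have hge : L ≤ h := by
          obtain ⟨k, hk, rfl⟩ := List.mem_iff_getElem.mp hmem
          rw [pvArr_getElem b L r (by rwa [pvArr_length] at hk)]
          have := le_max_right (b[k]'(by rwa [pvArr_length] at hk)) L
          split_ifs <;> omega
        have hle2 : h ≤ L := by
          have := PySem.List.key_head_sorted_le _ _ hs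
          simpa using this L hLmem
        omega
    rw [hAval, hb0]
    -- the binary search also returns the unique bracketed level
    have hbr2 : M < pvCost b (b[0] + M + 1) := by
      have := pvCost_ge_of_mem (List.getElem_mem hn) (b[0] + M + 1)
      omega
    obtain ⟨g1, g2⟩ := pvBS_spec (((b[0] + M) - b[0]).toNat + 1) M b b[0] (b[0] + M)
      (by omega) (by omega) (by omega) hbr2
    exact pvLevel_unique b M h1 h2 g1 g2
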